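-- pv_equiv track=rewrite | github.com/qurbaneliii/AI-Social-Media-Manager | packages/decision-engine/functions/audience_resolution.py | _move_to_front
-- ===== SOURCE A (Python) =====
-- def _move_to_front(items: list[str], segment: str) -> list[str]:
--     lowered = segment.lower()
--     idx = next((i for i, item in enumerate(items) if item.lower() == lowered), None)
--     if idx is None:
--         return items
--     chosen = items[idx]
--     rest = [item for i, item in enumerate(items) if i != idx]
--     return [chosen, *rest]
-- ===== SOURCE B (Python) =====
-- def _move_to_front(items: list[str], segment: str) -> list[str]:
--     lowered = segment.lower()
--     chosen = None
--     rest = []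
--     for item in items:
--         if chosen is None and item.lower() == lowered:
--             chosen = item
--         else:
--             rest.append(item)
--     if chosen is None:
--         return items
--     return [chosen, *rest]
-- ===== Notes on version B (the rewrite author's own statement) =====
-- stated objective: simpler
-- what changed: Replaces the three passes (enumerate-scan for the index, indexing, enumerate-filter rebuild) by one fused loop that picks the first case-insensitive match into `chosen` and accumulates everything else into `rest`.
import Mathlib
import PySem

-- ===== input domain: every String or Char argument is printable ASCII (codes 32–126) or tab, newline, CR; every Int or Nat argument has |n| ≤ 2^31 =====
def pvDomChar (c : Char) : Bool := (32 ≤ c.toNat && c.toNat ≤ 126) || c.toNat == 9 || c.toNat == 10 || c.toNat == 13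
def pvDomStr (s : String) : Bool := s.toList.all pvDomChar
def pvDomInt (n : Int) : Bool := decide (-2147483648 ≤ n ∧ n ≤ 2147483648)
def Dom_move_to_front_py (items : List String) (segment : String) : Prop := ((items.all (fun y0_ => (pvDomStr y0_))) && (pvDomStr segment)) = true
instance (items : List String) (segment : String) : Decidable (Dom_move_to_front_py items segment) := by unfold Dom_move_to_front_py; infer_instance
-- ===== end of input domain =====

-- B fuses A's three passes (index search, indexing, filter rebuild) into one loop with a
-- `chosen` flag and a `rest` accumulator; same return value, simpler single traversal.

-- ===== PORT A =====
def move_to_front_py (items : List String) (segment : String) : List String :=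
  let lowered := PySem.Str.lower segment
  match (PySem.List.enumerate items).find? (fun pr => PySem.Str.lower pr.2 == lowered) with
  | none => items
  | some pr =>
      -- pr.1 is a valid index produced by enumerate, so pyGet? always returns some; getD "" is never taken
      let chosen := (PySem.List.pyGet? items pr.1).getD ""
      let rest := ((PySem.List.enumerate items).filter (fun q => q.1 != pr.1)).map (·.2)
      chosen :: rest

-- ===== PORT B =====
def move_to_front_py_alt (items : List String) (segment : String) : List String :=
  let lowered := PySem.Str.lower segment
  let st := items.foldl (fun (st : Option String × List String) item =>
      match st with
      | (none, rest) =>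
          if PySem.Str.lower item == lowered then (some item, rest) else (none, rest ++ [item])
      | (some c, rest) => (some c, rest ++ [item])) (none, [])
  match st with
  | (none, _) => items
  | (some c, rest) => c :: rest

-- ===== PRECONDITION & SPEC =====
def Spec_move_to_front_py (items : List String) (segment : String) (out : List String) : Prop := out = move_to_front_py_alt items segment
instance (items : List String) (segment : String) (out : List String) : Decidable (Spec_move_to_front_py items segment out) := by unfold Spec_move_to_front_py; infer_instance

-- ===== CLAIM (what is proved, stated in full; the proofs are below) =====
def Claim_equal_move_to_front_py : Prop := ∀ (items : List String) (segment : String), Dom_move_to_front_py items segment → Spec_move_to_front_py items segment (move_to_front_py items segment)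

-- ===== LEMMAS AND PROOFS =====

lemma pv_find_enumerate (q : String → Bool) :
    ∀ (xs : List String) (s : Int),
      (PySem.List.enumerate xs s).find? (fun pr => q pr.2)
        = (xs.findIdx? q).map (fun (k : Nat) => ((s + (k : Int), xs.getD k "") : Int × String)) := by
  intro xs
  induction xs with
  | nil => intro s; simp [PySem.List.enumerate]
  | cons x xs ih =>
      intro s
      rw [PySem.List.enumerate_cons, List.find?_cons]
      by_cases hq : q x
      · simp [hq, List.findIdx?_cons]
      · simp only [hq, List.findIdx?_cons]
        rw [ih (s + 1)]
        cases h : xs.findIdx? q with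
        | none => simp
        | some k =>
            simp only [Bool.false_eq_true, if_false, Option.map_some, Option.some.injEq,
              Prod.mk.injEq, List.getD_cons_succ]
            refine ⟨by push_cast; ring, trivial⟩

lemma pv_filter_enumerate (xs : List String) :
    ∀ (s : Int) (k : Nat), k < xs.length →
      ((PySem.List.enumerate xs s).filter (fun pr => pr.1 != s + (k : Int))).map (·.2)
        = xs.eraseIdx k := by
  induction xs with
  | nil => intro s k h; simp at h
  | cons x xs ih =>
      intro s k hk
      rw [PySem.List.enumerate_cons, List.filter_cons]
      cases k with
      | zero =>
          simp only [Nat.cast_zero, add_zero, bne_self_eq_false, Bool.false_eq_true, if_false]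
          have : (PySem.List.enumerate xs (s + 1)).filter (fun pr => pr.1 != s) =
              PySem.List.enumerate xs (s + 1) := by
            apply List.filter_eq_self.mpr
            intro p hp
            rcases (PySem.List.mem_enumerate_iff xs (s + 1) p).mp hp with ⟨j, hj, rfl⟩
            simp only [bne_iff_ne, ne_eq]
            omega
          rw [this, PySem.List.map_snd_enumerate, List.eraseIdx_cons_zero]
      | succ k =>
          have hhead : (s != s + ((k + 1 : Nat) : Int)) = true := by
            simp only [bne_iff_ne, ne_eq]; push_cast; omega
          rw [hhead]
          simp only [if_true, List.map_cons, List.eraseIdx_cons_succ, List.cons.injEq]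
          refine ⟨trivial, ?_⟩
          have := ih (s + 1) k (by simpa using hk)
          rw [← this]
          congr 2
          funext p
          congr 1
          push_cast
          ring

lemma pv_findIdx_lt (q : String → Bool) : ∀ (xs : List String) (k : Nat), xs.findIdx? q = some k → k < xs.length := by
  intro xs
  induction xs with
  | nil => intro k h; simp at h
  | cons x xs ih =>
      intro k h
      rw [List.findIdx?_cons] at h
      by_cases hq : q x
      · simp [hq] at h; simp [List.length_cons]; omega
      · simp only [hq, Bool.false_eq_true, if_false] at h
        cases h2 : xs.findIdx? q with
        | none => rw [h2] at h; simp at h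
        | some j =>
            rw [h2] at h
            simp only [Option.map_some, Option.some.injEq] at h
            have := ih j h2
            simp [List.length_cons]; omega

lemma pv_A_char (items : List String) (segment : String) :
    move_to_front_py items segment
      = match items.findIdx? (fun s => PySem.Str.lower s == PySem.Str.lower segment) with
        | none => items
        | some k => items.getD k "" :: items.eraseIdx k := by
  unfold move_to_front_py
  simp only []
  rw [pv_find_enumerate (fun s => PySem.Str.lower s == PySem.Str.lower segment) items 0]
  cases h : items.findIdx? (fun s => PySem.Str.lower s == PySem.Str.lower segment) with
  | none => simp
  | some k =>
      have hk : k < items.length := pv_findIdx_lt _ _ _ h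
      simp only [Option.map_some]
      rw [pv_filter_enumerate items 0 k hk]
      simp [List.getD, PySem.List.pyGet?_natCast]

lemma pv_loop_some (lowered : String) (xs : List String) :
    ∀ (c : String) (acc : List String),
      xs.foldl (fun (st : Option String × List String) item =>
        match st with
        | (none, rest) =>
            if PySem.Str.lower item == lowered then (some item, rest) else (none, rest ++ [item])
        | (some c', rest) => (some c', rest ++ [item])) (some c, acc)
      = (some c, acc ++ xs) := by
  induction xs with
  | nil => intro c acc; simp
  | cons x xs ih => intro c acc; simp only [List.foldl_cons]; rw [ih]; simp

lemma pv_loop_none (lowered : String) (xs : List String) :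
    ∀ (acc : List String),
      xs.foldl (fun (st : Option String × List String) item =>
        match st with
        | (none, rest) =>
            if PySem.Str.lower item == lowered then (some item, rest) else (none, rest ++ [item])
        | (some c', rest) => (some c', rest ++ [item])) (none, acc)
      = match xs.findIdx? (fun s => PySem.Str.lower s == lowered) with
        | none => (none, acc ++ xs)
        | some k => (some (xs.getD k ""), acc ++ xs.eraseIdx k) := by
  induction xs with
  | nil => intro acc; simp
  | cons x xs ih =>
      intro acc
      simp only [List.foldl_cons]
      by_cases hq : (PySem.Str.lower x == lowered) = true
      · simp only [hq, if_true]
        rw [pv_loop_some, List.findIdx?_cons, hq]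
        simp [List.getD]
      · simp only [hq, Bool.false_eq_true, if_false]
        rw [ih (acc ++ [x]), List.findIdx?_cons]
        simp only [hq]
        cases h : xs.findIdx? (fun s => PySem.Str.lower s == lowered) with
        | none => simp
        | some k => simp [List.getD]

lemma pv_B_char (items : List String) (segment : String) :
    move_to_front_py_alt items segment
      = match items.findIdx? (fun s => PySem.Str.lower s == PySem.Str.lower segment) with
        | none => items
        | some k => items.getD k "" :: items.eraseIdx k := by
  unfold move_to_front_py_alt
  simp only []
  rw [pv_loop_none (PySem.Str.lower segment) items []]
  cases h : items.findIdx? (fun s => PySem.Str.lower s == PySem.Str.lower segment) with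
  | none => simp
  | some k => simp

-- ===== VERDICT (by name: the statement is the Claim_ definition above) =====
theorem move_to_front_py_spec : Claim_equal_move_to_front_py := by
  intro items segment _
  unfold Spec_move_to_front_py
  rw [pv_A_char, pv_B_char]
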